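-- pv_equiv track=rewrite | github.com/asu-gkg/htsim-rs | tools/neusight_to_workload.py | build_rank_map
-- ===== SOURCE A (Python) =====
-- def rank_for(dp_idx, pp_idx, tp_idx, dp_degree, pp_degree, tp_degree):
--     return (dp_idx * pp_degree + pp_idx) * tp_degree + tp_idx
--
-- def build_rank_map(dp_degree, pp_degree, tp_degree):
--     ranks = []
--     for dp_idx in range(dp_degree):
--         for pp_idx in range(pp_degree):
--             for tp_idx in range(tp_degree):
--                 rank = rank_for(dp_idx, pp_idx, tp_idx, dp_degree, pp_degree, tp_degree)
--                 ranks.append({"id": rank, "dp": dp_idx, "pp": pp_idx, "tp": tp_idx})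
--     return ranks
-- ===== SOURCE B (Python) =====
-- def build_rank_map(dp_degree, pp_degree, tp_degree):
--     if dp_degree <= 0 or pp_degree <= 0 or tp_degree <= 0:
--         return []
--     total = dp_degree * pp_degree * tp_degree
--     return [
--         {"id": rank,
--          "dp": rank // (pp_degree * tp_degree),
--          "pp": rank // tp_degree % pp_degree,
--          "tp": rank % tp_degree}
--         for rank in range(total)
--     ]
-- ===== Notes on version B (the rewrite author's own statement) =====
-- stated objective: alternative
-- what changed: Replaced the three nested loops plus the rank_for helper by one flat loop over range(dp*pp*tp) that recovers the dp/pp/tp coordinates of each rank by floor-division and modulo.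
import Mathlib
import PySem

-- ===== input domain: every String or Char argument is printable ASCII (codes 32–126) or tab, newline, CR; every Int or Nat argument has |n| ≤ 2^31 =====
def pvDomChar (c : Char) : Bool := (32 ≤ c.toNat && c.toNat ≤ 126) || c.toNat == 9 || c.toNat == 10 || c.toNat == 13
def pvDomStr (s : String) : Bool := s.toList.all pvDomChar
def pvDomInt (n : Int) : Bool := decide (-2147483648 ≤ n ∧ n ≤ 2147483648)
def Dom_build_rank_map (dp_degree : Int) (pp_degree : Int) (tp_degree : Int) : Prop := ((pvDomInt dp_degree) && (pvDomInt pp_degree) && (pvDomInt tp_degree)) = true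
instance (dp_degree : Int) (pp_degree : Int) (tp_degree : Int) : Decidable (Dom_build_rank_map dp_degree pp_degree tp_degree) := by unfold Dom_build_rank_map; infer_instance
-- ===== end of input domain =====

-- B replaces the three nested loops by one flat loop over range(dp*pp*tp),
-- recovering each rank's coordinates by floor-division and modulo (alternative decomposition).

-- ===== PORT A =====
def rank_for (dp_idx pp_idx tp_idx _dp_degree pp_degree tp_degree : Int) : Int :=
  (dp_idx * pp_degree + pp_idx) * tp_degree + tp_idx

def build_rank_map (dp_degree : Int) (pp_degree : Int) (tp_degree : Int) : List (List (String × Int)) :=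
  (PySem.List.pyRange 0 dp_degree 1).foldl (fun acc dp_idx =>
    (PySem.List.pyRange 0 pp_degree 1).foldl (fun acc pp_idx =>
      (PySem.List.pyRange 0 tp_degree 1).foldl (fun acc tp_idx =>
        acc ++ [[("id", rank_for dp_idx pp_idx tp_idx dp_degree pp_degree tp_degree),
                 ("dp", dp_idx), ("pp", pp_idx), ("tp", tp_idx)]]) acc) acc) []

-- ===== PORT B =====
def build_rank_map_alt (dp_degree : Int) (pp_degree : Int) (tp_degree : Int) : List (List (String × Int)) :=
  if dp_degree ≤ 0 ∨ pp_degree ≤ 0 ∨ tp_degree ≤ 0 then []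
  else
    let total := dp_degree * pp_degree * tp_degree
    (PySem.List.pyRange 0 total 1).map (fun rank =>
      [("id", rank),
       ("dp", PySem.Int.floordiv rank (pp_degree * tp_degree)),
       ("pp", PySem.Int.mod (PySem.Int.floordiv rank tp_degree) pp_degree),
       ("tp", PySem.Int.mod rank tp_degree)])

-- ===== PRECONDITION & SPEC =====
def Spec_build_rank_map (dp_degree : Int) (pp_degree : Int) (tp_degree : Int) (out : List (List (String × Int))) : Prop := out = build_rank_map_alt dp_degree pp_degree tp_degree
instance (dp_degree : Int) (pp_degree : Int) (tp_degree : Int) (out : List (List (String × Int))) : Decidable (Spec_build_rank_map dp_degree pp_degree tp_degree out) := by unfold Spec_build_rank_map; infer_instance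

-- ===== CLAIM (what is proved, stated in full; the proofs are below) =====
def Claim_equal_build_rank_map : Prop := ∀ (dp_degree : Int) (pp_degree : Int) (tp_degree : Int), Dom_build_rank_map dp_degree pp_degree tp_degree → Spec_build_rank_map dp_degree pp_degree tp_degree (build_rank_map dp_degree pp_degree tp_degree)

-- ===== LEMMAS AND PROOFS =====

/-- Decompose `range (D*n)` as a double traversal: row-major index arithmetic. -/
lemma range_mul_flatMap (D n : Nat) :
    List.range (D * n) = (List.range D).flatMap (fun i => (List.range n).map (fun j => i * n + j)) := by
  induction D with
  | zero => simp
  | succ D ih =>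
    rw [Nat.succ_mul, List.range_add, ih, List.range_succ, List.flatMap_append]
    simp

/-- A as a triple flatMap. -/
lemma portA_flatMap (dp pp tp : Int) :
    build_rank_map dp pp tp =
      (PySem.List.pyRange 0 dp 1).flatMap (fun i =>
        (PySem.List.pyRange 0 pp 1).flatMap (fun j =>
          (PySem.List.pyRange 0 tp 1).map (fun k =>
            [("id", rank_for i j k dp pp tp), ("dp", i), ("pp", j), ("tp", k)]))) := by
  unfold build_rank_map
  rw [show (fun (acc : List (List (String × Int))) (dp_idx : Int) =>
        (PySem.List.pyRange 0 pp 1).foldl (fun acc pp_idx =>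
          (PySem.List.pyRange 0 tp 1).foldl (fun acc tp_idx =>
            acc ++ [[("id", rank_for dp_idx pp_idx tp_idx dp pp tp),
                     ("dp", dp_idx), ("pp", pp_idx), ("tp", tp_idx)]]) acc) acc) =
      (fun acc dp_idx => acc ++
        (PySem.List.pyRange 0 pp 1).flatMap (fun j =>
          (PySem.List.pyRange 0 tp 1).map (fun k =>
            [("id", rank_for dp_idx j k dp pp tp), ("dp", dp_idx), ("pp", j), ("tp", k)])))
      from ?_]
  · rw [PySem.List.foldl_append_eq_flatMap]; simp
  · funext acc i
    rw [show (fun (acc : List (List (String × Int))) (pp_idx : Int) =>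
          (PySem.List.pyRange 0 tp 1).foldl (fun acc tp_idx =>
            acc ++ [[("id", rank_for i pp_idx tp_idx dp pp tp),
                     ("dp", i), ("pp", pp_idx), ("tp", tp_idx)]]) acc) =
        (fun acc pp_idx => acc ++
          (PySem.List.pyRange 0 tp 1).map (fun k =>
            [("id", rank_for i pp_idx k dp pp tp), ("dp", i), ("pp", pp_idx), ("tp", k)]))
        from ?_]
    · rw [PySem.List.foldl_append_eq_flatMap]
    · funext acc j
      rw [PySem.List.foldl_append_singleton_eq_map]

theorem build_rank_map_spec : Claim_equal_build_rank_map := by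
  intro dp pp tp _
  show build_rank_map dp pp tp = build_rank_map_alt dp pp tp
  unfold build_rank_map_alt
  split
  · rename_i h
    rw [portA_flatMap]
    rcases h with h | h | h
    · rw [PySem.List.pyRange_one_eq_nil (a := (0:Int)) (b := dp) (by omega)]; simp
    · rw [PySem.List.pyRange_one_eq_nil (a := (0:Int)) (b := pp) (by omega)]; simp
    · rw [PySem.List.pyRange_one_eq_nil (a := (0:Int)) (b := tp) (by omega)]; simp
  · rename_i h
    push Not at h
    obtain ⟨hdp, hpp, htp⟩ := h
    obtain ⟨D, rfl⟩ : ∃ D : Nat, dp = (D : Int) := ⟨dp.toNat, (Int.toNat_of_nonneg (by omega)).symm⟩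
    obtain ⟨P, rfl⟩ : ∃ P : Nat, pp = (P : Int) := ⟨pp.toNat, (Int.toNat_of_nonneg (by omega)).symm⟩
    obtain ⟨T, rfl⟩ : ∃ T : Nat, tp = (T : Int) := ⟨tp.toNat, (Int.toNat_of_nonneg (by omega)).symm⟩
    have hD : 0 < D := by exact_mod_cast hdp
    have hP : 0 < P := by exact_mod_cast hpp
    have hT : 0 < T := by exact_mod_cast htp
    rw [portA_flatMap, show ((D:Int) * P * T) = ((D * (P * T) : Nat) : Int) by push_cast; ring]
    simp only [PySem.List.pyRange_one, Int.sub_zero, Int.toNat_natCast, zero_add]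
    rw [range_mul_flatMap D (P * T), range_mul_flatMap P T]
    simp only [List.map_flatMap, List.flatMap_map, List.map_map]
    refine List.flatMap_congr ?_
    intro i hi
    refine List.flatMap_congr ?_
    intro j hj
    refine List.map_congr_left ?_
    intro k hk
    simp only [List.mem_range] at hi hj hk
    simp only [Function.comp]
    have e1 : PySem.Int.floordiv (↑(i * (P * T) + (j * T + k)) : Int) ((P:Int) * T) = (i : Int) := by
      rw [show ((P:Int) * T) = ((P * T : Nat) : Int) by push_cast; ring, PySem.Int.floordiv_natCast]
      congr 1
      rw [show i * (P * T) + (j * T + k) = (j * T + k) + i * (P * T) by ring,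
          Nat.add_mul_div_right _ _ (by positivity), Nat.div_eq_of_lt (by nlinarith), Nat.zero_add]
    have e2 : PySem.Int.mod (PySem.Int.floordiv (↑(i * (P * T) + (j * T + k)) : Int) (T:Int)) (P:Int) = (j : Int) := by
      rw [PySem.Int.floordiv_natCast, PySem.Int.mod_natCast]
      congr 1
      have hdiv : (i * (P * T) + (j * T + k)) / T = j + i * P := by
        rw [show i * (P * T) + (j * T + k) = k + (j + i * P) * T by ring,
            Nat.add_mul_div_right _ _ hT, Nat.div_eq_of_lt hk, Nat.zero_add]
      rw [hdiv, Nat.add_mul_mod_self_right, Nat.mod_eq_of_lt hj]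
    have e3 : PySem.Int.mod (↑(i * (P * T) + (j * T + k)) : Int) (T:Int) = (k : Int) := by
      rw [PySem.Int.mod_natCast]
      congr 1
      rw [show i * (P * T) + (j * T + k) = k + (i * P + j) * T by ring, Nat.add_mul_mod_self_right,
          Nat.mod_eq_of_lt hk]
    rw [e1, e2, e3,
        show ((i * (P * T) + (j * T + k) : Nat) : Int) = rank_for ↑i ↑j ↑k ↑D ↑P ↑T by
          unfold rank_for; push_cast; ring]
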